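-- pv_equiv track=rewrite | github.com/dkalley/Hybrid-Regressor | hybrid.py | weighted
-- ===== SOURCE A (Python) =====
-- def weighted(list_features, k):
--     weighted = {}
--
--     # For a feature set in the list of features
--     for feats in list_features:
--         # Loop over all features
--         for i in range(k-1):
--             # If the feature is in the weighted dictionary then att the rank to its value
--             if feats[i] in weighted:
--                 weighted[feats[i]] = weighted[feats[i]] + i + 1
--             # Otherwise create an element for the feature with the given rank
--             else:
--                 weighted[feats[i]] = i + 1
--
--     # Sort the dictionary in order of smallest rank to largest
--     sorted_weight = [k for k,v in sorted(weighted.items(), key=lambda item: item[1])]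
--
--     # Return the k best features
--     return sorted_weight[:k]
-- ===== SOURCE B (Python) =====
-- def weighted(list_features, k):
--     # Same rank accumulation; selection of the k best by repeated extraction of the
--     # leftmost minimal-rank item (stable) instead of fully sorting and slicing.
--     totals = {}
--     for feats in list_features:
--         for i in range(k - 1):
--             totals[feats[i]] = totals.get(feats[i], 0) + i + 1
--
--     items = list(totals.items())
--     best = []
--     while items and len(best) < k:
--         m = items[0]
--         for p in items[1:]:
--             if p[1] < m[1]:
--                 m = p
--         best.append(m[0])
--         items.remove(m)
--     return best
-- ===== Notes on version B (the rewrite author's own statement) =====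
-- stated objective: alternative
-- what changed: B keeps the rank-accumulation pass (with dict.get instead of a membership branch) but replaces A's full sort of all items plus slice by a bounded stable selection: at most k rounds, each extracting the leftmost item of minimal accumulated rank.
import Mathlib
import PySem

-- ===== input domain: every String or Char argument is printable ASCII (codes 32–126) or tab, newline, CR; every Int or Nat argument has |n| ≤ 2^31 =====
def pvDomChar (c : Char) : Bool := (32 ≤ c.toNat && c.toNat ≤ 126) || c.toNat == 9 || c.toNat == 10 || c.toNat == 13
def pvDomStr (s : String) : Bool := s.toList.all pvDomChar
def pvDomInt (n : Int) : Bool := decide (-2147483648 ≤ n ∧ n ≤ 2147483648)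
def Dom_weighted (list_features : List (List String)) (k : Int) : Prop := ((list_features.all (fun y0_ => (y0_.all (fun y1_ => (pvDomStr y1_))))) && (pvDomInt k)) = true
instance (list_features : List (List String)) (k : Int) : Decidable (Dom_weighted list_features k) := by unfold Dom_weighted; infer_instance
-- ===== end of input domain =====

-- B replaces A's full sort + slice by a bounded stable selection (repeatedly extract the
-- leftmost minimal-rank item, at most k times); same return value, alternative algorithm.

-- ===== PORT A =====
def weighted (list_features : List (List String)) (k : Int) : List String :=
  PySem.List.slice
    ((PySem.List.sorted
        (list_features.foldl (fun w feats =>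
          (PySem.List.pyRange 0 (k - 1) 1).foldl (fun w i =>
            if w.contains (PySem.List.pyGetD feats i "")   -- feats[i]; in range on Pre_weighted
            then w.insert (PySem.List.pyGetD feats i "") (w.getD (PySem.List.pyGetD feats i "") 0 + i + 1)
            else w.insert (PySem.List.pyGetD feats i "") (i + 1)) w)
          (PySem.Dict.empty : PySem.Dict String Int)).items
        (fun p => p.2) false).map Prod.fst)
    none (some k)

-- ===== PORT B =====
-- inner 'for p in items[1:]' scan of Source B: running minimum (strict <, so leftmost wins)
def pickMin (m : String × Int) : List (String × Int) → String × Int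
  | [] => m
  | p :: rest => pickMin (if p.2 < m.2 then p else m) rest

-- Source B's 'while items and len(best) < k' loop; fuel = items.length (each step removes one item)
def selLoop (k : Int) : Nat → List (String × Int) → List String → List String
  | 0, _, best => best
  | _ + 1, [], best => best
  | fuel + 1, x :: rest, best =>
    if (best.length : Int) < k then
      selLoop k fuel ((PySem.List.remove? (x :: rest) (pickMin x rest)).getD [])
        (best ++ [(pickMin x rest).1])
    else best

def weighted_alt (list_features : List (List String)) (k : Int) : List String :=
  let totals : PySem.Dict String Int :=
    list_features.foldl (fun t feats =>
      (PySem.List.pyRange 0 (k - 1) 1).foldl (fun t i =>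
        t.insert (PySem.List.pyGetD feats i "")   -- feats[i]; in range on Pre_weighted
          (t.getD (PySem.List.pyGetD feats i "") 0 + i + 1)) t)
      PySem.Dict.empty
  selLoop k totals.items.length totals.items []

-- ===== PRECONDITION & SPEC =====
-- Pre_ excludes exactly the inputs where A raises IndexError (k ≥ 2 and some feature list
-- shorter than k-1); B raises there too.
def Pre_weighted (list_features : List (List String)) (k : Int) : Prop :=
  k ≤ 1 ∨ ∀ fs ∈ list_features, k - 1 ≤ (fs.length : Int)
instance (list_features : List (List String)) (k : Int) : Decidable (Pre_weighted list_features k) := by unfold Pre_weighted; infer_instance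

def pvWitness_weighted : List (List String) × Int := ([["a", "b"], ["b", "a"]], 3)

def Spec_weighted (list_features : List (List String)) (k : Int) (out : List String) : Prop := out = weighted_alt list_features k
instance (list_features : List (List String)) (k : Int) (out : List String) : Decidable (Spec_weighted list_features k out) := by unfold Spec_weighted; infer_instance

-- ===== CLAIM (what is proved, stated in full; the proofs are below) =====
def Claim_equal_weighted : Prop := ∀ (list_features : List (List String)) (k : Int), Dom_weighted list_features k → Pre_weighted list_features k → Spec_weighted list_features k (weighted list_features k)

-- ===== LEMMAS AND PROOFS =====

-- the two accumulation loops build the same dict ('not in' branch = adding i+1 to default 0)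
theorem accum_eq (list_features : List (List String)) (k : Int) :
    list_features.foldl (fun w feats =>
      (PySem.List.pyRange 0 (k - 1) 1).foldl (fun w i =>
        if w.contains (PySem.List.pyGetD feats i "")
        then w.insert (PySem.List.pyGetD feats i "") (w.getD (PySem.List.pyGetD feats i "") 0 + i + 1)
        else w.insert (PySem.List.pyGetD feats i "") (i + 1)) w)
      (PySem.Dict.empty : PySem.Dict String Int)
    = list_features.foldl (fun t feats =>
      (PySem.List.pyRange 0 (k - 1) 1).foldl (fun t i =>
        t.insert (PySem.List.pyGetD feats i "")
          (t.getD (PySem.List.pyGetD feats i "") 0 + i + 1)) t)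
      PySem.Dict.empty := by
  apply PySem.List.foldl_congr_mem
  intro acc feats _
  apply PySem.List.foldl_congr_mem
  intro w i _
  by_cases hc : w.contains (PySem.List.pyGetD feats i "") = true
  · simp [hc]
  · have hc' : w.contains (PySem.List.pyGetD feats i "") = false := by
      simpa using hc
    simp [hc', PySem.Dict.getD_of_not_contains _ _ hc']

theorem remove?_cons {α : Type} [BEq α] (a v : α) (l : List α) :
    PySem.List.remove? (a :: l) v = if a == v then some l else (PySem.List.remove? l v).map (a :: ·) := by
  simp [PySem.List.remove?, List.idxOf?_cons]
  split <;> simp [Option.map_map]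
  congr 1

theorem remove?_isSome {α : Type} [BEq α] [LawfulBEq α] (l : List α) (v : α) (h : v ∈ l) :
    (PySem.List.remove? l v).isSome := by
  induction l with
  | nil => simp at h
  | cons a t ih =>
    rw [remove?_cons]
    by_cases hav : a = v
    · simp [hav]
    · have hvt : v ∈ t := by
        rcases List.mem_cons.mp h with h' | h'
        · exact absurd h'.symm hav
        · exact h'
      simp [beq_iff_eq, hav, Option.isSome_map, ih hvt]

theorem remove?_append_of_not_mem {α : Type} [BEq α] [LawfulBEq α] (l : List α) (v : α)
    (h : v ∉ l) : PySem.List.remove? (l ++ [v]) v = some l := by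
  induction l with
  | nil => simp [PySem.List.remove?]
  | cons a t ih =>
    have ha : a ≠ v := by intro e; exact h (by simp [e])
    rw [List.cons_append, remove?_cons, ih (fun hm => h (by simp [hm]))]
    simp [beq_iff_eq, ha]

theorem remove?_append_of_mem {α : Type} [BEq α] [LawfulBEq α] (l : List α) (v x : α)
    (h : v ∈ l) :
    PySem.List.remove? (l ++ [x]) v = some ((PySem.List.remove? l v).getD [] ++ [x]) := by
  induction l with
  | nil => simp at h
  | cons a t ih =>
    rw [List.cons_append, remove?_cons, remove?_cons]
    by_cases hav : a = v
    · simp [hav]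
    · have hvt : v ∈ t := by
        rcases List.mem_cons.mp h with h' | h'
        · exact absurd h'.symm hav
        · exact h'
      obtain ⟨t', ht'⟩ := Option.isSome_iff_exists.mp (remove?_isSome t v hvt)
      simp [beq_iff_eq, hav, ih hvt, ht']

theorem remove?_length {α : Type} [BEq α] [LawfulBEq α] (l : List α) (v : α) (h : v ∈ l) :
    ((PySem.List.remove? l v).getD []).length + 1 = l.length := by
  induction l with
  | nil => simp at h
  | cons a t ih =>
    rw [remove?_cons]
    by_cases hav : a = v
    · simp [hav]
    · have hvt : v ∈ t := by
        rcases List.mem_cons.mp h with h' | h'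
        · exact absurd h'.symm hav
        · exact h'
      obtain ⟨t', ht'⟩ := Option.isSome_iff_exists.mp (remove?_isSome t v hvt)
      have := ih hvt
      simp [ht'] at this
      simp [beq_iff_eq, hav, ht', this]

theorem pickMin_mem (m : String × Int) (l : List (String × Int)) : pickMin m l ∈ m :: l := by
  induction l generalizing m with
  | nil => simp [pickMin]
  | cons p r ih =>
    simp only [pickMin]
    rcases List.mem_cons.mp (ih (if p.2 < m.2 then p else m)) with h | h
    · rw [h]
      split
      · exact List.mem_cons_of_mem _ (List.mem_cons_self ..)
      · exact List.mem_cons_self ..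
    · exact List.mem_cons_of_mem _ (List.mem_cons_of_mem _ h)

theorem pickMin_min (m : String × Int) (l : List (String × Int)) :
    ∀ y ∈ m :: l, (pickMin m l).2 ≤ y.2 := by
  induction l generalizing m with
  | nil =>
    intro y hy
    simp at hy
    subst hy
    simp [pickMin]
  | cons p r ih =>
    intro y hy
    simp only [pickMin]
    have hq : (if p.2 < m.2 then p else m).2 ≤ m.2 ∧ (if p.2 < m.2 then p else m).2 ≤ p.2 := by
      split <;> omega
    have hhead : (pickMin (if p.2 < m.2 then p else m) r).2 ≤ (if p.2 < m.2 then p else m).2 :=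
      ih _ _ (List.mem_cons_self ..)
    rcases List.mem_cons.mp hy with rfl | hy'
    · exact le_trans hhead hq.1
    rcases List.mem_cons.mp hy' with rfl | hy''
    · exact le_trans hhead hq.2
    · exact ih _ y (List.mem_cons_of_mem _ hy'')

theorem pickMin_append (m : String × Int) (l : List (String × Int)) (x : String × Int) :
    pickMin m (l ++ [x]) = if x.2 < (pickMin m l).2 then x else pickMin m l := by
  induction l generalizing m with
  | nil => simp [pickMin]
  | cons p r ih => simp only [List.cons_append, pickMin, ih]

theorem insertBy_cons (bef : (String × Int) → (String × Int) → Bool) (y m : String × Int)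
    (S : List (String × Int)) :
    PySem.List.insertBy bef y (m :: S)
      = if bef y m then y :: m :: S else m :: PySem.List.insertBy bef y S := by
  simp [PySem.List.insertBy]

theorem sorted_append_one (l : List (String × Int)) (y : String × Int) :
    PySem.List.sorted (l ++ [y]) (fun p => p.2) false
      = PySem.List.insertBy (fun a b => decide (a.2 < b.2)) y
          (PySem.List.sorted l (fun p => p.2) false) := by
  rw [PySem.List.sorted_eq_foldl_insertBy, PySem.List.sorted_eq_foldl_insertBy, List.foldl_append]
  simp

-- head of the stable sort is the leftmost minimal element; the tail sorts the rest
theorem sorted_cons_min (x : String × Int) (r : List (String × Int)) :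
    PySem.List.sorted (x :: r) (fun p => p.2) false
      = pickMin x r ::
        PySem.List.sorted ((PySem.List.remove? (x :: r) (pickMin x r)).getD [])
          (fun p => p.2) false := by
  induction r using List.reverseRecOn with
  | nil => simp [pickMin, PySem.List.sorted, PySem.List.insertBy]
  | append_singleton r y ih =>
    have hmem : pickMin x r ∈ x :: r := pickMin_mem x r
    have hmin := pickMin_min x r
    rw [show x :: (r ++ [y]) = (x :: r) ++ [y] by simp]
    rw [sorted_append_one, ih, insertBy_cons, pickMin_append]
    by_cases hy : y.2 < (pickMin x r).2
    · have hyn : y ∉ x :: r := fun hm => absurd (hmin y hm) (by omega)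
      rw [if_pos hy, remove?_append_of_not_mem _ _ hyn]
      simp [hy, ih]
    · rw [if_neg hy, remove?_append_of_mem _ _ _ hmem]
      simp [hy, sorted_append_one]

def selAll : Nat → List (String × Int) → List (String × Int)
  | 0, _ => []
  | _ + 1, [] => []
  | fuel + 1, x :: rest =>
    pickMin x rest :: selAll fuel ((PySem.List.remove? (x :: rest) (pickMin x rest)).getD [])

theorem selAll_eq_sorted (fuel : Nat) (L : List (String × Int)) (h : L.length ≤ fuel) :
    selAll fuel L = PySem.List.sorted L (fun p => p.2) false := by
  induction fuel generalizing L with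
  | zero =>
    have : L = [] := List.length_eq_zero_iff.mp (Nat.le_zero.mp h)
    subst this
    simp [selAll, PySem.List.sorted]
  | succ fuel ih =>
    cases L with
    | nil => simp [selAll, PySem.List.sorted]
    | cons x r =>
      rw [sorted_cons_min]
      simp only [selAll]
      congr 1
      apply ih
      have := remove?_length (x :: r) (pickMin x r) (pickMin_mem x r)
      simp only [List.length_cons] at this h
      omega

theorem selLoop_eq (k : Int) (fuel : Nat) (L : List (String × Int)) (best : List String) :
    selLoop k fuel L best
      = best ++ ((selAll fuel L).map Prod.fst).take ((k - best.length).toNat) := by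
  induction fuel generalizing L best with
  | zero => simp [selLoop, selAll]
  | succ fuel ih =>
    cases L with
    | nil => simp [selLoop, selAll]
    | cons x r =>
      simp only [selLoop, selAll]
      by_cases hk : (best.length : Int) < k
      · rw [if_pos hk, ih]
        have h1 : ((k - best.length).toNat) = ((k - ((best.length : Int) + 1)).toNat) + 1 := by
          omega
        simp [h1, List.append_assoc]
      · rw [if_neg hk]
        have h0 : ((k - best.length).toNat) = 0 := by omega
        simp [h0]

-- ===== VERDICT (by name: the statement is the Claim_ definition above) =====
theorem weighted_spec : Claim_equal_weighted := by
  intro lf k _ _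
  unfold Spec_weighted weighted weighted_alt
  rw [accum_eq]
  set d := lf.foldl (fun t feats =>
      (PySem.List.pyRange 0 (k - 1) 1).foldl (fun t i =>
        t.insert (PySem.List.pyGetD feats i "")
          (t.getD (PySem.List.pyGetD feats i "") 0 + i + 1)) t)
      (PySem.Dict.empty : PySem.Dict String Int) with hd
  rw [selLoop_eq, selAll_eq_sorted _ _ (le_refl _)]
  by_cases hk : 0 ≤ k
  · rw [PySem.List.slice_to _ hk]
    simp
  · have hr : PySem.List.pyRange 0 (k - 1) 1 = [] := by
      simp [PySem.List.pyRange]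
      omega
    have hde : d = PySem.Dict.empty := by
      rw [hd, hr]
      simp
    rw [hde]
    simp [PySem.Dict.empty, PySem.List.sorted, PySem.List.slice]
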